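-- pv_equiv track=rewrite | github.com/jessekearns/advent-of-code-2017 | 21/21b.py | enhanceMatrix
-- ===== SOURCE A (Python) =====
-- def parseToString(matrix):
--     output = ""
--     for i in range(len(matrix)):
--         for j in range(len(matrix[i])):
--             output += matrix[i][j]
--         output += '/'
--     return output[:-1]
--
-- def splitMatrix(matrix):
--     composedSize = len(matrix)
--     innerSize = 0
--     outerSize = 0
--     if composedSize % 2 == 0:
--         innerSize = 2
--         outerSize = int(composedSize / 2)
--     else:
--         innerSize = 3
--         outerSize = int(composedSize / 3)
--
--     components = []
--
--     for iOut in range(outerSize):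
--         components.append([])
--         for jOut in range(outerSize):
--             components[iOut].append([])
--             for i in range(innerSize):
--                 components[iOut][jOut].append([])
--                 for j in range(innerSize):
--                     components[iOut][jOut][i].append(matrix[(iOut * innerSize) + i][(jOut * innerSize) + j])
--     return components
--
-- def composeMatrix(components):
--     outerSize = len(components)
--     innerSize = len(components[0][0])
--     composedSize = outerSize * innerSize
--
--     # default matrix
--     fullMatrix = []
--     for i in range(composedSize):
--         row = []
--         for j in range(composedSize):
--             row.append('.')
--         fullMatrix.append(row)
--
--     for iOut in range(outerSize):
--         for jOut in range(outerSize):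
--             component = components[iOut][jOut]
--             for i in range(innerSize):
--                 for j in range(innerSize):
--                     fullMatrix[(iOut * innerSize) + i][(jOut * innerSize) + j] = component[i][j]
--
--     return fullMatrix
--
-- def enhanceMatrix(matrix, dict):
--     if len(matrix[0]) > 3:
--         components = splitMatrix(matrix)
--         for i in range(len(components)):
--             for j in range(len(components)):
--                 components[i][j] = enhanceMatrix(components[i][j], dict)
--         return composeMatrix(components)
--     else:
--         return dict[parseToString(matrix)]
-- ===== SOURCE B (Python) =====
-- def enhanceMatrix(matrix, dict):
--     size = len(matrix[0])
--     if size <= 3: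
--         return dict['/'.join(''.join(row) for row in matrix)]
--     block = 2 if size % 2 == 0 else 3
--     nblocks = size // block
--     out = []
--     for bi in range(nblocks):
--         rows = None
--         for bj in range(nblocks):
--             key = '/'.join(''.join(matrix[bi * block + r][bj * block:bj * block + block])
--                            for r in range(block))
--             enh = dict[key]
--             if rows is None:
--                 rows = [[] for _ in range(len(enh))]
--             for r, out_row in enumerate(rows):
--                 out_row.extend(enh[r])
--         out.extend(rows)
--     return out
-- ===== Notes on version B (the rewrite author's own statement) =====
-- stated objective: simpler
-- what changed: B replaces A's recursion with its splitMatrix/composeMatrix/parseToString helpers (which builds an intermediate 4-level nested block structure, recursively enhances each block, pre-fills a '.'-matrix and overwrites every cell) by one flat pass that looks up each block's rule key directly from the input and appends the enhanced rows into the output as it goes.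
import Mathlib
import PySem

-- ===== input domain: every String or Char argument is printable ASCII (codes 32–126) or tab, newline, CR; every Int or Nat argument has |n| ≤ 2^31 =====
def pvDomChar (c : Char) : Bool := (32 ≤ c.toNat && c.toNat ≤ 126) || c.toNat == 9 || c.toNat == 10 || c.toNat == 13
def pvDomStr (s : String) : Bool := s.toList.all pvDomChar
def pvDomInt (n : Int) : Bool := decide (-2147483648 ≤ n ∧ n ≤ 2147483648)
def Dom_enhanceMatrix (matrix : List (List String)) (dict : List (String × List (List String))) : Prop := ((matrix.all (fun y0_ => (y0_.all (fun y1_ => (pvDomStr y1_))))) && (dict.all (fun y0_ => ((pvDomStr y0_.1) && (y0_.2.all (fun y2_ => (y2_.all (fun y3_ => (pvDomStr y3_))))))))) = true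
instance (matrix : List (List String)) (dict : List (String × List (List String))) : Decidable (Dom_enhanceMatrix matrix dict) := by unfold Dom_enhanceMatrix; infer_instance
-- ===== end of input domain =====

-- B re-implements the enhancement step without recursion and without the split/compose helpers:
-- one flat pass over the block grid (objective: simpler/alternative decomposition, same result).
-- ===== PORT A =====
-- helper of A: parseToString (loops over range(len(..)) with indexing; exact via pyRange/pyGetD, s[:-1] via Str.slice)
def parseToString (matrix : List (List String)) : String :=
  let output : String :=
    (PySem.List.pyRange 0 (matrix.length : Int) 1).foldl (fun output i =>
      ((PySem.List.pyRange 0 ((PySem.List.pyGetD matrix i []).length : Int) 1).foldl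
        (fun output j => output ++ PySem.List.pyGetD (PySem.List.pyGetD matrix i []) j "") output) ++ "/")
      ""
  PySem.Str.slice output none (some (-1))

-- helper of A: splitMatrix (append-loops over range(...) become maps over List.range; indices are
-- nonnegative, matrix[idx] is exact via getD whenever Python does not raise)
def splitMatrix (matrix : List (List String)) : List (List (List (List String))) :=
  let composedSize := matrix.length
  let innerSize := if composedSize % 2 == 0 then 2 else 3
  let outerSize := if composedSize % 2 == 0 then composedSize / 2 else composedSize / 3
  (List.range outerSize).map (fun iOut =>
    (List.range outerSize).map (fun jOut =>
      (List.range innerSize).map (fun i =>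
        (List.range innerSize).map (fun j =>
          (matrix.getD (iOut * innerSize + i) []).getD (jOut * innerSize + j) ""))))

-- helper of A: composeMatrix ('fullMatrix[a][b] = v' becomes List.set on the row, exact in range)
def composeMatrix (components : List (List (List (List String)))) : List (List String) :=
  let outerSize := components.length
  let innerSize := ((components.getD 0 []).getD 0 []).length
  let composedSize := outerSize * innerSize
  let fullMatrix : List (List String) :=
    (List.range composedSize).map (fun _ => (List.range composedSize).map (fun _ => "."))
  (List.range outerSize).foldl (fun fm iOut =>
    (List.range outerSize).foldl (fun fm jOut =>
      let component := (components.getD iOut []).getD jOut []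
      (List.range innerSize).foldl (fun fm i =>
        (List.range innerSize).foldl (fun fm j =>
          fm.set (iOut * innerSize + i)
            ((fm.getD (iOut * innerSize + i) []).set (jOut * innerSize + j)
              ((component.getD i []).getD j "")))
        fm) fm) fm) fullMatrix

-- termination fact for A's recursion: every block produced by splitMatrix has first-row length ≤ 3
theorem pvSplit_block_small {matrix : List (List String)} {row : List (List (List String))}
    {c : List (List String)} (hrow : row ∈ splitMatrix matrix) (hc : c ∈ row) :
    (c.headD []).length ≤ 3 := by
  simp only [splitMatrix, List.mem_map, List.mem_range] at hrow
  obtain ⟨iOut, _, rfl⟩ := hrow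
  simp only [List.mem_map, List.mem_range] at hc
  obtain ⟨jOut, _, rfl⟩ := hc
  by_cases h : matrix.length % 2 == 0 <;> simp [h, List.range_succ]

def enhanceMatrix (matrix : List (List String)) (dict : List (String × List (List String))) : List (List String) :=
  if 3 < (matrix.headD []).length then
    composeMatrix ((splitMatrix matrix).attach.map (fun row =>
      row.1.attach.map (fun c => enhanceMatrix c.1 dict)))
  else
    PySem.Dict.getD (PySem.Dict.mk dict) (parseToString matrix) []
termination_by (matrix.headD []).length
decreasing_by
  have := pvSplit_block_small row.2 c.2
  omega

-- ===== PORT B =====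
def enhanceMatrix_alt (matrix : List (List String)) (dict : List (String × List (List String))) : List (List String) :=
  let size := (matrix.headD []).length
  if size ≤ 3 then
    PySem.Dict.getD (PySem.Dict.mk dict)
      (PySem.Str.join "/" (matrix.map (fun row => PySem.Str.join "" row))) []
  else
    let block := if size % 2 == 0 then 2 else 3
    let nblocks := size / block
    (List.range nblocks).foldl (fun out bi =>
      let rowsOpt := (List.range nblocks).foldl
        (fun (rowsOpt : Option (List (List String))) bj =>
          let key := PySem.Str.join "/" ((List.range block).map (fun r =>
            PySem.Str.join "" (PySem.List.slice (matrix.getD (bi * block + r) [])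
              (some ((bj * block : Nat) : Int)) (some ((bj * block + block : Nat) : Int)))))
          let enh := PySem.Dict.getD (PySem.Dict.mk dict) key []
          let rows := match rowsOpt with
            | none => enh.map (fun _ => ([] : List String))
            | some rs => rs
          some ((PySem.List.enumerate rows 0).map (fun p => p.2 ++ PySem.List.pyGetD enh p.1 [])))
        none
      match rowsOpt with
      | some rs => out ++ rs
      | none => out) []

-- ===== PRECONDITION & SPEC =====
-- helpers for Pre_ (independent of both ports): the rule key of a matrix, and the (bi,bj) block
def pvRowKey (row : List String) : String := PySem.Str.join "" row
def pvKey (rows : List (List String)) : String := PySem.Str.join "/" (rows.map pvRowKey)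
def pvBlock (matrix : List (List String)) (b bi bj : Nat) : List (List String) :=
  (List.range b).map (fun r => ((matrix.getD (bi * b + r) []).drop (bj * b)).take b)

-- Pre_ excludes (a) inputs where A raises (empty matrix, a missing rule key, a replacement block
-- too small for composeMatrix's indexing) and (b) non-square matrices and dicts whose looked-up
-- replacement blocks are not all square of one common size: there A's surviving value is an
-- accident of index truncation in splitMatrix/composeMatrix (see cites), not a specified behaviour.
def Pre_enhanceMatrix (matrix : List (List String)) (dict : List (String × List (List String))) : Prop :=
  matrix ≠ [] ∧
  (if (matrix.headD []).length ≤ 3 then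
    (PySem.Dict.get? (PySem.Dict.mk dict) (pvKey matrix)).isSome = true
  else
    matrix.length = (matrix.headD []).length ∧
    (∀ row ∈ matrix, row.length = matrix.length) ∧
    (let b := if matrix.length % 2 = 0 then 2 else 3
     let m := matrix.length / b
     let k := ((PySem.Dict.get? (PySem.Dict.mk dict) (pvKey (pvBlock matrix b 0 0))).getD []).length
     ∀ bi ∈ List.range m, ∀ bj ∈ List.range m,
       ((PySem.Dict.get? (PySem.Dict.mk dict) (pvKey (pvBlock matrix b bi bj))).any
         (fun v => v.length == k && v.all (fun row => row.length == k))) = true))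

instance (matrix : List (List String)) (dict : List (String × List (List String))) : Decidable (Pre_enhanceMatrix matrix dict) := by unfold Pre_enhanceMatrix; infer_instance

def pvWitness_enhanceMatrix : List (List String) × (List (String × List (List String))) :=
  ([["#", "."], [".", "#"]], [("#./.#", [["#"]])])

def Spec_enhanceMatrix (matrix : List (List String)) (dict : List (String × List (List String))) (out : List (List String)) : Prop := out = enhanceMatrix_alt matrix dict
instance (matrix : List (List String)) (dict : List (String × List (List String))) (out : List (List String)) : Decidable (Spec_enhanceMatrix matrix dict out) := by unfold Spec_enhanceMatrix; infer_instance

-- ===== CLAIM (what is proved, stated in full; the proofs are below) =====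
def Claim_equal_enhanceMatrix : Prop := ∀ (matrix : List (List String)) (dict : List (String × List (List String))), Dom_enhanceMatrix matrix dict → Pre_enhanceMatrix matrix dict → Spec_enhanceMatrix matrix dict (enhanceMatrix matrix dict)


-- ===== LEMMAS AND PROOFS =====

-- ---- generic helpers ----

-- abbreviation used only by the proofs: the single cell write 'fm[a][b] = v' of composeMatrix
def pvWrite (fm : List (List String)) (w : Nat × Nat × String) : List (List String) :=
  fm.set w.1 ((fm.getD w.1 []).set w.2.1 w.2.2)

def pvCharAt (fm : List (List String)) (a b : Nat) : String := (fm.getD a []).getD b ""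

theorem pv_getD_eq_getElem? {α : Type} (l : List α) (i : Nat) (d : α) :
    l.getD i d = (l[i]?).getD d := by
  simp [List.getD]

theorem pv_map_range_getD_eq_drop_take {α : Type} (l : List α) (off n : Nat) (d : α)
    (h : off + n ≤ l.length) :
    (List.range n).map (fun j => l.getD (off + j) d) = (l.drop off).take n := by
  apply List.ext_getElem
  · simp; omega
  · intro i h1 h2
    simp only [List.getElem_map, List.getElem_range, List.getElem_take, List.getElem_drop]
    rw [List.getD_eq_getElem l d (by simp at h1 ⊢; omega)]

theorem pv_flatMap_length {α : Type} (m k : Nat) (f : Nat → List α)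
    (hf : ∀ i < m, (f i).length = k) :
    ((List.range m).flatMap f).length = m * k := by
  induction m with
  | zero => simp
  | succ m ih =>
    rw [List.range_succ, List.flatMap_append]
    simp only [List.length_append, List.flatMap_cons, List.flatMap_nil, List.append_nil]
    rw [ih (fun i hi => hf i (by omega)), hf m (by omega)]
    ring

theorem pv_flatMap_getD {α : Type} (m k : Nat) (f : Nat → List α)
    (hf : ∀ i < m, (f i).length = k) (d : α) (q r : Nat) (hq : q < m) (hr : r < k) :
    ((List.range m).flatMap f).getD (q * k + r) d = (f q).getD r d := by
  induction m with
  | zero => omega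
  | succ n ih =>
    rw [List.range_succ, List.flatMap_append]
    simp only [List.flatMap_cons, List.flatMap_nil, List.append_nil]
    have hlen : ((List.range n).flatMap f).length = n * k :=
      pv_flatMap_length n k f (fun i hi => hf i (by omega))
    by_cases hc : q < n
    · have h1 : (q + 1) * k ≤ n * k := Nat.mul_le_mul_right k (by omega)
      have h2 : (q + 1) * k = q * k + k := by ring
      rw [pv_getD_eq_getElem?, List.getElem?_append_left (by omega), ← pv_getD_eq_getElem?]
      exact ih (fun i hi => hf i (by omega)) hc
    · have hq' : q = n := by omega
      have hge : ((List.range n).flatMap f).length ≤ q * k + r := by rw [hlen, hq']; omega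
      rw [pv_getD_eq_getElem?, List.getElem?_append_right hge, hlen]
      have he : q * k + r - n * k = r := by rw [hq']; omega
      rw [he, ← pv_getD_eq_getElem?, hq']

theorem pv_flatMap_eq_single {α : Type} (m i0 : Nat) (F : Nat → List α) (h0 : i0 < m)
    (h : ∀ i < m, i ≠ i0 → F i = []) : (List.range m).flatMap F = F i0 := by
  induction m with
  | zero => omega
  | succ n ih =>
    rw [List.range_succ, List.flatMap_append]
    simp only [List.flatMap_cons, List.flatMap_nil, List.append_nil]
    by_cases hm : i0 = n
    · subst hm
      have hnil : (List.range i0).flatMap F = [] := by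
        apply List.flatMap_eq_nil_iff.mpr
        intro x hx
        simp only [List.mem_range] at hx
        exact h x (by omega) (by omega)
      rw [hnil, List.nil_append]
    · rw [h n (by omega) (by omega),
        ih (by omega) (fun i hi hne => h i (by omega) hne), List.append_nil]

theorem pv_filter_flatMap {α : Type} (l : List α) (f : α → List (Nat × Nat × String))
    (p : Nat × Nat × String → Bool) :
    (l.flatMap f).filter p = l.flatMap (fun x => (f x).filter p) := by
  induction l with
  | nil => simp
  | cons x l ih => simp [List.flatMap_cons, List.filter_append, ih]

theorem pv_filter_range_beq (k r : Nat) (hr : r < k) :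
    (List.range k).filter (fun j => j == r) = [r] := by
  induction k with
  | zero => omega
  | succ n ih =>
    rw [List.range_succ, List.filter_append]
    by_cases h : r = n
    · subst h
      have hnil : (List.range r).filter (fun j => j == r) = [] :=
        List.filter_eq_nil_iff.mpr (by intro x hx; simp only [List.mem_range] at hx; simp; omega)
      rw [hnil, List.nil_append]
      simp
    · rw [ih (by omega)]
      have hne : (n == r) = false := by simp; omega
      simp [hne]

-- ---- pvWrite / fold-of-writes facts ----

theorem pvWrite_length (fm : List (List String)) (w : Nat × Nat × String) :
    (pvWrite fm w).length = fm.length := by simp [pvWrite]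

theorem pvWrite_oob (fm : List (List String)) (w : Nat × Nat × String)
    (h : fm.length ≤ w.1) : pvWrite fm w = fm := by
  unfold pvWrite; exact List.set_eq_of_length_le h

theorem pvWrite_row_length (fm : List (List String)) (w : Nat × Nat × String) (a : Nat) :
    ((pvWrite fm w).getD a []).length = (fm.getD a []).length := by
  by_cases h2 : w.1 < fm.length
  · by_cases h1 : w.1 = a
    · subst h1
      simp [pvWrite, pv_getD_eq_getElem?, List.getElem?_set, h2]
    · simp [pvWrite, pv_getD_eq_getElem?, List.getElem?_set, h1]
  · rw [pvWrite_oob fm w (by omega)]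

theorem pvWrite_charAt_hit (fm : List (List String)) (w : Nat × Nat × String)
    (h1 : w.1 < fm.length) (h2 : w.2.1 < (fm.getD w.1 []).length) :
    pvCharAt (pvWrite fm w) w.1 w.2.1 = w.2.2 := by
  have h2'' : w.2.1 < (fm[w.1]'h1).length := by
    rw [pv_getD_eq_getElem?, List.getElem?_eq_getElem h1] at h2
    simpa using h2
  simp [pvCharAt, pvWrite, pv_getD_eq_getElem?, List.getElem?_set, h1, h2'']

theorem pvWrite_charAt_miss (fm : List (List String)) (w : Nat × Nat × String) (a b : Nat)
    (h : ¬ (w.1 = a ∧ w.2.1 = b)) :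
    pvCharAt (pvWrite fm w) a b = pvCharAt fm a b := by
  by_cases h2 : w.1 < fm.length
  · by_cases ha : w.1 = a
    · subst ha
      have hb : w.2.1 ≠ b := by tauto
      simp [pvCharAt, pvWrite, pv_getD_eq_getElem?, List.getElem?_set, h2, hb]
    · simp [pvCharAt, pvWrite, pv_getD_eq_getElem?, List.getElem?_set, ha]
  · rw [pvWrite_oob fm w (by omega)]

theorem pv_foldl_write_length (ws : List (Nat × Nat × String)) (fm : List (List String)) :
    (ws.foldl pvWrite fm).length = fm.length := by
  induction ws generalizing fm with
  | nil => rfl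
  | cons w ws ih => rw [List.foldl_cons, ih, pvWrite_length]

theorem pv_foldl_write_row_length (ws : List (Nat × Nat × String)) (fm : List (List String))
    (a : Nat) : ((ws.foldl pvWrite fm).getD a []).length = ((fm.getD a []).length) := by
  induction ws generalizing fm with
  | nil => rfl
  | cons w ws ih => rw [List.foldl_cons, ih, pvWrite_row_length]

theorem pv_foldl_write_miss (ws : List (Nat × Nat × String)) (fm : List (List String)) (a b : Nat)
    (h : ∀ w ∈ ws, ¬ (w.1 = a ∧ w.2.1 = b)) :
    pvCharAt (ws.foldl pvWrite fm) a b = pvCharAt fm a b := by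
  induction ws generalizing fm with
  | nil => rfl
  | cons w ws ih =>
    rw [List.foldl_cons, ih _ (fun w' hw' => h w' (by simp [hw'])),
      pvWrite_charAt_miss _ _ _ _ (h w (by simp))]

theorem pv_foldl_write_unique (ws : List (Nat × Nat × String)) (fm : List (List String))
    (a b : Nat) (w0 : Nat × Nat × String)
    (hfil : ws.filter (fun w => w.1 == a && w.2.1 == b) = [w0])
    (ha : a < fm.length) (hb : b < (fm.getD a []).length) :
    pvCharAt (ws.foldl pvWrite fm) a b = w0.2.2 := by
  induction ws generalizing fm with
  | nil => simp at hfil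
  | cons w ws ih =>
    rw [List.foldl_cons]
    by_cases hmatch : (w.1 == a && w.2.1 == b) = true
    · simp only [List.filter_cons, hmatch, if_true] at hfil
      simp only [List.cons.injEq] at hfil
      obtain ⟨rfl, hnil⟩ := hfil
      have hnone : ∀ w' ∈ ws, ¬ (w'.1 = a ∧ w'.2.1 = b) := by
        intro w' hw' hcon
        have : w' ∈ ws.filter (fun w => w.1 == a && w.2.1 == b) := by
          simp [List.mem_filter, hw', hcon.1, hcon.2]
        rw [hnil] at this; simp at this
      rw [pv_foldl_write_miss _ _ _ _ hnone]
      simp only [beq_iff_eq, Bool.and_eq_true] at hmatch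
      obtain ⟨h1, h2⟩ := hmatch
      subst h1; subst h2
      exact pvWrite_charAt_hit fm w ha hb
    · rw [Bool.not_eq_true] at hmatch
      simp only [List.filter_cons, hmatch, Bool.false_eq_true, if_false] at hfil
      apply ih _ hfil
      · rw [pvWrite_length]; exact ha
      · rw [pvWrite_row_length]; exact hb

-- ---- string-key lemmas ----

theorem pv_rowfold_toList (row : List String) (acc : String) :
    (row.foldl (· ++ ·) acc).toList = acc.toList ++ (row.map String.toList).flatten := by
  induction row generalizing acc with
  | nil => simp
  | cons s row ih => simp [List.foldl_cons, ih]

theorem pv_chars_join_nil_sep (ps : List (List Char)) :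
    PySem.Chars.join [] ps = ps.flatten := by
  induction ps with
  | nil => simp [PySem.Chars.join, List.intercalate]
  | cons x t ih =>
    cases t with
    | nil => simp [PySem.Chars.join, List.intercalate]
    | cons y t2 =>
      rw [PySem.Chars.join_cons_cons, ih]
      simp

theorem pv_chars_join_slash (cs : List (List Char)) (h : cs ≠ []) :
    PySem.Chars.join ['/'] cs ++ ['/'] = (cs.map (fun c => c ++ ['/'])).flatten := by
  induction cs with
  | nil => simp at h
  | cons x t ih =>
    cases t with
    | nil => simp [PySem.Chars.join, List.intercalate]
    | cons y t2 =>
      rw [PySem.Chars.join_cons_cons, List.map_cons, List.flatten_cons, ← ih (by simp)]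
      simp [List.append_assoc]

theorem pv_rowKey_toList (row : List String) :
    (pvRowKey row).toList = (row.map String.toList).flatten := by
  unfold pvRowKey
  rw [PySem.Str.toList_join]
  have hsep : ("" : String).toList = [] := rfl
  rw [hsep, pv_chars_join_nil_sep]

theorem pv_key_toList (rows : List (List String)) (h : rows ≠ []) :
    (pvKey rows).toList ++ ['/'] =
      (rows.map (fun row => (row.map String.toList).flatten ++ ['/'])).flatten := by
  unfold pvKey
  rw [PySem.Str.toList_join]
  have hsep : ("/" : String).toList = ['/'] := rfl
  rw [hsep, List.map_map]
  have hmap : rows.map (String.toList ∘ pvRowKey) =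
      rows.map (fun row => (row.map String.toList).flatten) :=
    List.map_congr_left (fun r _ => pv_rowKey_toList r)
  rw [hmap, pv_chars_join_slash _ (by simpa using h), List.map_map]
  exact congrArg List.flatten (List.map_congr_left (fun r _ => rfl))

theorem pv_parse_fold_toList (rows : List (List String)) (acc : String) :
    (rows.foldl (fun acc row => (row.foldl (· ++ ·) acc) ++ "/") acc).toList =
      acc.toList ++ (rows.map (fun row => (row.map String.toList).flatten ++ ['/'])).flatten := by
  induction rows generalizing acc with
  | nil => simp
  | cons r rows ih =>
    rw [List.foldl_cons, ih]
    simp [pv_rowfold_toList]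

theorem pv_parse_eq_key (matrix : List (List String)) (h : matrix ≠ []) :
    parseToString matrix = pvKey matrix := by
  apply String.toList_inj.mp
  unfold parseToString
  rw [PySem.Str.slice_to_neg_one]
  rw [PySem.List.foldl_pyRange_zero_pyGetD' matrix []
    (fun output row => ((PySem.List.pyRange 0 (row.length : Int) 1).foldl
      (fun output j => output ++ PySem.List.pyGetD row j "") output) ++ "/") ""]
  rw [PySem.List.foldl_congr_mem matrix _
    (fun output row => (row.foldl (· ++ ·) output) ++ "/") ""
    (fun acc row _ => by
      rw [PySem.List.foldl_pyRange_zero_pyGetD' row "" (fun o c => o ++ c) acc])]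
  rw [pv_parse_fold_toList matrix ""]
  have h0 : ("" : String).toList = [] := rfl
  rw [h0, List.nil_append, ← pv_key_toList matrix h, List.dropLast_concat]

-- ---- B-side loop shape ----

theorem pv_enum_map_range (k : Nat) (g : Nat → List String) :
    PySem.List.enumerate ((List.range k).map g) 0 =
      (List.range k).map (fun (r : Nat) => ((r : Int), g r)) := by
  apply List.ext_getElem
  · simp [PySem.List.length_enumerate]
  · intro i h1 h2
    rw [PySem.List.getElem_enumerate]
    simp

theorem pv_B_step (k : Nat) (e : List (List String)) (g : Nat → List String) :
    (PySem.List.enumerate ((List.range k).map g) 0).map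
        (fun p => p.2 ++ PySem.List.pyGetD e p.1 []) =
      (List.range k).map (fun r => g r ++ e.getD r []) := by
  rw [pv_enum_map_range, List.map_map]
  apply List.map_congr_left
  intro r _
  simp [PySem.List.pyGetD_natCast]

theorem pv_B_inner (k : Nat) (e : Nat → List (List String)) (L : List Nat)
    (g : Nat → List String) :
    L.foldl (fun rowsOpt bj => some ((PySem.List.enumerate (match rowsOpt with
        | none => (e bj).map (fun _ => ([] : List String))
        | some rs => rs) 0).map (fun p => p.2 ++ PySem.List.pyGetD (e bj) p.1 [])))
      (some ((List.range k).map g)) =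
    some ((List.range k).map (fun r => g r ++ L.flatMap (fun bj => (e bj).getD r []))) := by
  induction L generalizing g with
  | nil => simp
  | cons bj L ih =>
    rw [List.foldl_cons]
    have hred : (match (some ((List.range k).map g) : Option (List (List String))) with
        | none => (e bj).map (fun _ => ([] : List String)) | some rs => rs) =
        (List.range k).map g := rfl
    rw [hred, pv_B_step k (e bj) g, ih (fun r => g r ++ (e bj).getD r [])]
    congr 1
    apply List.map_congr_left
    intro r _
    simp [List.append_assoc]

theorem pv_B_inner_none (k : Nat) (e : Nat → List (List String)) (L : List Nat) (bj0 : Nat)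
    (he0 : (e bj0).length = k) :
    (bj0 :: L).foldl (fun rowsOpt bj => some ((PySem.List.enumerate (match rowsOpt with
        | none => (e bj).map (fun _ => ([] : List String))
        | some rs => rs) 0).map (fun p => p.2 ++ PySem.List.pyGetD (e bj) p.1 [])))
      none =
    some ((List.range k).map (fun r => (bj0 :: L).flatMap (fun bj => (e bj).getD r []))) := by
  rw [List.foldl_cons]
  have h0 : ((e bj0).map (fun _ => ([] : List String))) =
      (List.range k).map (fun _ => ([] : List String)) := by
    apply List.ext_getElem
    · simp [he0]
    · intro i h1 h2; simp
  have hred : (match (none : Option (List (List String))) with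
      | none => (e bj0).map (fun _ => ([] : List String)) | some rs => rs) =
      (e bj0).map (fun _ => ([] : List String)) := rfl
  rw [hred, h0, pv_B_step k (e bj0) (fun _ => []),
    pv_B_inner k e L (fun r => [] ++ (e bj0).getD r [])]
  congr 1

-- ---- A-side compose: nested assignment loops as one list of writes ----

theorem pv_foldfold (l1 l2 : List Nat) (P : Nat → Nat → (Nat × Nat × String))
    (fm : List (List String)) :
    l1.foldl (fun fm x => l2.foldl (fun fm y => pvWrite fm (P x y)) fm) fm
      = (l1.flatMap (fun x => l2.map (P x))).foldl pvWrite fm := by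
  rw [List.foldl_flatMap]
  apply PySem.List.foldl_congr_mem
  intro fm' x _
  rw [List.foldl_map]

theorem pv_foldfold4 (l1 l2 l3 l4 : List Nat)
    (P : Nat → Nat → Nat → Nat → (Nat × Nat × String)) (fm : List (List String)) :
    l1.foldl (fun fm a => l2.foldl (fun fm b => l3.foldl (fun fm c =>
        l4.foldl (fun fm d => pvWrite fm (P a b c d)) fm) fm) fm) fm
      = (l1.flatMap (fun a => l2.flatMap (fun b => l3.flatMap (fun c =>
          l4.map (P a b c))))).foldl pvWrite fm := by
  rw [List.foldl_flatMap]
  apply PySem.List.foldl_congr_mem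
  intro fm1 a _
  rw [List.foldl_flatMap]
  apply PySem.List.foldl_congr_mem
  intro fm2 b _
  exact pv_foldfold l3 l4 (P a b) fm2

theorem pv_compose_writes (components : List (List (List (List String)))) :
    composeMatrix components =
      ((List.range components.length).flatMap (fun iOut =>
        (List.range components.length).flatMap (fun jOut =>
          (List.range (((components.getD 0 []).getD 0 []).length)).flatMap (fun i =>
            (List.range (((components.getD 0 []).getD 0 []).length)).map (fun j =>
              (iOut * (((components.getD 0 []).getD 0 []).length) + i,
               jOut * (((components.getD 0 []).getD 0 []).length) + j,
               (((components.getD iOut []).getD jOut []).getD i []).getD j "")))))).foldl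
        pvWrite
        ((List.range (components.length * (((components.getD 0 []).getD 0 []).length))).map
          (fun _ => (List.range (components.length * (((components.getD 0 []).getD 0 []).length))).map
            (fun _ => ".")))
      := by
  unfold composeMatrix
  exact pv_foldfold4 (List.range components.length) (List.range components.length)
    (List.range (((components.getD 0 []).getD 0 []).length))
    (List.range (((components.getD 0 []).getD 0 []).length))
    (fun iOut jOut i j =>
      (iOut * (((components.getD 0 []).getD 0 []).length) + i,
       jOut * (((components.getD 0 []).getD 0 []).length) + j,
       (((components.getD iOut []).getD jOut []).getD i []).getD j ""))
    _

theorem pv_block_index_inj (k io i q r : Nat) (hi : i < k) (hr : r < k)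
    (h : io * k + i = q * k + r) : io = q ∧ i = r := by
  have hk : 0 < k := by omega
  have h1 : io = (io * k + i) / k := by
    rw [show io * k + i = k * io + i by ring, Nat.mul_add_div hk, Nat.div_eq_of_lt hi]
    omega
  have h2 : q = (q * k + r) / k := by
    rw [show q * k + r = k * q + r by ring, Nat.mul_add_div hk, Nat.div_eq_of_lt hr]
    omega
  have h3 : io = q := by rw [h1, h, ← h2]
  subst h3
  constructor
  · rfl
  · omega

theorem pv_flatMap_congr {α β : Type} (l : List α) (f g : α → List β)
    (h : ∀ x ∈ l, f x = g x) : l.flatMap f = l.flatMap g := by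
  induction l with
  | nil => rfl
  | cons x t ih =>
    simp only [List.flatMap_cons]
    rw [h x (by simp), ih (fun y hy => h y (by simp [hy]))]

theorem pv_compose_grid (m k : Nat) (hm : 0 < m) (V : Nat → Nat → List (List String))
    (hVlen : ∀ i < m, ∀ j < m, (V i j).length = k)
    (hVrow : ∀ i < m, ∀ j < m, ∀ row ∈ V i j, row.length = k) :
    composeMatrix ((List.range m).map (fun i => (List.range m).map (fun j => V i j))) =
      (List.range m).flatMap (fun q => (List.range k).map (fun i =>
        (List.range m).flatMap (fun j => (V q j).getD i []))) := by
  have hGlen : ((List.range m).map (fun i => (List.range m).map (fun j => V i j))).length = m := by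
    simp
  have hG00 : (( ((List.range m).map (fun i => (List.range m).map (fun j => V i j))).getD 0 []).getD 0 []) = V 0 0 := by
    rw [PySem.List.getD_map_range _ m 0 [] hm, PySem.List.getD_map_range _ m 0 [] hm]
  have hkk : (( ((List.range m).map (fun i => (List.range m).map (fun j => V i j))).getD 0 []).getD 0 []).length = k := by
    rw [hG00]; exact hVlen 0 hm 0 hm
  rw [pv_compose_writes, hGlen, hkk]
  have hWS : ((List.range m).flatMap (fun iOut =>
        (List.range m).flatMap (fun jOut =>
          (List.range k).flatMap (fun i =>
            (List.range k).map (fun j =>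
              (iOut * k + i, jOut * k + j,
               (((((List.range m).map (fun i' => (List.range m).map (fun j' => V i' j'))).getD iOut []).getD jOut []).getD i []).getD j "")))))) =
      ((List.range m).flatMap (fun iOut =>
        (List.range m).flatMap (fun jOut =>
          (List.range k).flatMap (fun i =>
            (List.range k).map (fun j =>
              (iOut * k + i, jOut * k + j, ((V iOut jOut).getD i []).getD j "")))))) := by
    apply pv_flatMap_congr
    intro io hio
    apply pv_flatMap_congr
    intro jo hjo
    simp only [List.mem_range] at hio hjo
    rw [PySem.List.getD_map_range _ m io [] hio, PySem.List.getD_map_range _ m jo [] hjo]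
  rw [hWS]
  have hFMlen : ((List.range (m * k)).map
      (fun _ => (List.range (m * k)).map (fun _ => ("." : String)))).length = m * k := by simp
  have hFMrow : ∀ a, a < m * k →
      (((List.range (m * k)).map (fun _ => (List.range (m * k)).map (fun _ => ("." : String)))).getD a [])
        = (List.range (m * k)).map (fun _ => ("." : String)) := by
    intro a ha
    exact PySem.List.getD_map_range _ _ _ _ ha
  apply List.ext_getElem
  · rw [pv_foldl_write_length, hFMlen,
      pv_flatMap_length m k _ (fun i hi => by simp)]
  · intro a h1 h2
    rw [pv_foldl_write_length, hFMlen] at h1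
    have hk : 0 < k := by
      rcases Nat.eq_zero_or_pos k with h0 | h0
      · rw [h0, Nat.mul_zero] at h1; omega
      · exact h0
    have hq : a / k < m := (Nat.div_lt_iff_lt_mul hk).mpr h1
    have hr : a % k < k := Nat.mod_lt a hk
    have ha : a / k * k + a % k = a := by rw [Nat.mul_comm]; exact Nat.div_add_mod a k
    have hTrow := pv_flatMap_getD m k
        (fun q => (List.range k).map (fun i => (List.range m).flatMap (fun j => (V q j).getD i [])))
        (fun i hi => by simp) [] (a / k) (a % k) hq hr
    rw [ha, PySem.List.getD_map_range _ k (a % k) [] hr] at hTrow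
    have hchunk : ∀ q' < m, ∀ j < m, ((V q' j).getD (a % k) []).length = k := by
      intro q' hq' j hj
      rw [List.getD_eq_getElem _ _ (by rw [hVlen q' hq' j hj]; exact hr)]
      exact hVrow q' hq' j hj _ (List.getElem_mem _)
    have hrowlenR : (((((List.range m).flatMap (fun iOut =>
          (List.range m).flatMap (fun jOut =>
            (List.range k).flatMap (fun i =>
              (List.range k).map (fun j =>
                (iOut * k + i, jOut * k + j, ((V iOut jOut).getD i []).getD j ""))))))).foldl pvWrite
          ((List.range (m * k)).map (fun _ => (List.range (m * k)).map (fun _ => ("." : String))))).getD a []).length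
        = m * k := by
      rw [pv_foldl_write_row_length, hFMrow a h1]
      simp
    have hrowlenT : ((List.range m).flatMap (fun j => (V (a / k) j).getD (a % k) [])).length = m * k :=
      pv_flatMap_length m k _ (fun j hj => hchunk (a / k) hq j hj)
    have hrows : ((((List.range m).flatMap (fun iOut =>
          (List.range m).flatMap (fun jOut =>
            (List.range k).flatMap (fun i =>
              (List.range k).map (fun j =>
                (iOut * k + i, jOut * k + j, ((V iOut jOut).getD i []).getD j "")))))).foldl pvWrite
          ((List.range (m * k)).map (fun _ => (List.range (m * k)).map (fun _ => ("." : String))))).getD a [])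
        = (List.range m).flatMap (fun j => (V (a / k) j).getD (a % k) []) := by
      apply List.ext_getElem
      · rw [hrowlenR, hrowlenT]
      · intro bb hb1 hb2
        have hb1m := hb1
        rw [hrowlenR] at hb1m
        have hq2 : bb / k < m := (Nat.div_lt_iff_lt_mul hk).mpr hb1m
        have hr2 : bb % k < k := Nat.mod_lt bb hk
        have hbb : bb / k * k + bb % k = bb := by rw [Nat.mul_comm]; exact Nat.div_add_mod bb k
        have hTentry := pv_flatMap_getD m k (fun j => (V (a / k) j).getD (a % k) [])
            (fun j hj => hchunk (a / k) hq j hj) "" (bb / k) (bb % k) hq2 hr2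
        rw [hbb] at hTentry
        have hzero1 : ∀ io < m, io ≠ a / k →
            (((List.range m).flatMap (fun jOut =>
              (List.range k).flatMap (fun i =>
                (List.range k).map (fun j =>
                  (io * k + i, jOut * k + j, ((V io jOut).getD i []).getD j ""))))).filter
              (fun w => w.1 == a && w.2.1 == bb)) = [] := by
          intro io hio hne
          apply List.filter_eq_nil_iff.mpr
          intro w hw
          simp only [List.mem_flatMap, List.mem_map, List.mem_range] at hw
          obtain ⟨jo, hjo, i, hi, j, hj, rfl⟩ := hw
          simp only [Bool.and_eq_true, beq_iff_eq]
          rintro ⟨h1x, _⟩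
          exact hne (pv_block_index_inj k io i (a / k) (a % k) hi hr (by omega)).1
        have hzero2 : ∀ jo < m, jo ≠ bb / k →
            (((List.range k).flatMap (fun i =>
              (List.range k).map (fun j =>
                (a / k * k + i, jo * k + j, ((V (a / k) jo).getD i []).getD j "")))).filter
              (fun w => w.1 == a && w.2.1 == bb)) = [] := by
          intro jo hjo hne
          apply List.filter_eq_nil_iff.mpr
          intro w hw
          simp only [List.mem_flatMap, List.mem_map, List.mem_range] at hw
          obtain ⟨i, hi, j, hj, rfl⟩ := hw
          simp only [Bool.and_eq_true, beq_iff_eq]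
          rintro ⟨_, h2x⟩
          exact hne (pv_block_index_inj k jo j (bb / k) (bb % k) hj hr2 (by omega)).1
        have hzero3 : ∀ i < k, i ≠ a % k →
            ((((List.range k).filter ((fun w => w.1 == a && w.2.1 == bb) ∘ (fun j =>
                (a / k * k + i, bb / k * k + j, ((V (a / k) (bb / k)).getD i []).getD j ""))))).map (fun j =>
                (a / k * k + i, bb / k * k + j, ((V (a / k) (bb / k)).getD i []).getD j ""))) = [] := by
          intro i hi hne
          have hfe : ((List.range k).filter ((fun w => w.1 == a && w.2.1 == bb) ∘ (fun j =>
              (a / k * k + i, bb / k * k + j, ((V (a / k) (bb / k)).getD i []).getD j "")))) = [] := by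
            apply List.filter_eq_nil_iff.mpr
            intro j hj
            simp only [List.mem_range] at hj
            simp only [Function.comp, Bool.and_eq_true, beq_iff_eq]
            rintro ⟨h1x, _⟩
            exact hne (pv_block_index_inj k i i (a / k) (a % k) hi hr (by omega)).2
          rw [hfe, List.map_nil]
        have hpoint : ∀ j ∈ List.range k,
            ((fun w => w.1 == a && w.2.1 == bb) ∘ (fun j =>
              (a / k * k + a % k, bb / k * k + j, ((V (a / k) (bb / k)).getD (a % k) []).getD j ""))) j
            = (j == bb % k) := by
          intro j hj
          simp only [List.mem_range] at hj
          simp only [Function.comp]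
          rw [show ((a / k * k + a % k == a) = true) by simp [ha], Bool.true_and]
          by_cases hje : j = bb % k
          · subst hje; simp [hbb]
          · have hne2 : bb / k * k + j ≠ bb := by omega
            simp [hje, hne2]
        have hfil : (((List.range m).flatMap (fun iOut =>
              (List.range m).flatMap (fun jOut =>
                (List.range k).flatMap (fun i =>
                  (List.range k).map (fun j =>
                    (iOut * k + i, jOut * k + j, ((V iOut jOut).getD i []).getD j "")))))).filter
              (fun w => w.1 == a && w.2.1 == bb))
            = [(a, bb, ((V (a / k) (bb / k)).getD (a % k) []).getD (bb % k) "")] := by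
          rw [pv_filter_flatMap,
            pv_flatMap_eq_single m (a / k) _ hq hzero1,
            pv_filter_flatMap,
            pv_flatMap_eq_single m (bb / k) _ hq2 hzero2,
            pv_filter_flatMap]
          have hfm : ∀ i ∈ List.range k,
              (((List.range k).map (fun j =>
                (a / k * k + i, bb / k * k + j, ((V (a / k) (bb / k)).getD i []).getD j ""))).filter
                (fun w => w.1 == a && w.2.1 == bb))
              = (((List.range k).filter ((fun w => w.1 == a && w.2.1 == bb) ∘ (fun j =>
                (a / k * k + i, bb / k * k + j, ((V (a / k) (bb / k)).getD i []).getD j "")))).map (fun j =>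
                (a / k * k + i, bb / k * k + j, ((V (a / k) (bb / k)).getD i []).getD j ""))) := by
            intro i _
            exact List.filter_map
          rw [pv_flatMap_congr _ _ _ hfm,
            pv_flatMap_eq_single k (a % k) _ hr hzero3,
            List.filter_congr hpoint, pv_filter_range_beq k (bb % k) hr2,
            List.map_cons, List.map_nil, ha, hbb]
        have h1' : a < ((List.range (m * k)).map
            (fun _ => (List.range (m * k)).map (fun _ => ("." : String)))).length := by
          rw [hFMlen]; exact h1
        have hb1' : bb < ((((List.range (m * k)).map
            (fun _ => (List.range (m * k)).map (fun _ => ("." : String)))).getD a [])).length := by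
          rw [hFMrow a h1]; simpa using hb1m
        have hchar := pv_foldl_write_unique _ _ a bb _ hfil h1' hb1'
        calc _ = pvCharAt (List.foldl pvWrite ((List.range (m * k)).map
                  (fun _ => (List.range (m * k)).map (fun _ => ("." : String))))
                  ((List.range m).flatMap (fun iOut =>
                    (List.range m).flatMap (fun jOut =>
                      (List.range k).flatMap (fun i =>
                        (List.range k).map (fun j =>
                          (iOut * k + i, jOut * k + j, ((V iOut jOut).getD i []).getD j ""))))))) a bb := by
              show _ = ((List.foldl pvWrite _ _).getD a []).getD bb ""
              exact (List.getD_eq_getElem _ _ hb1).symm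
          _ = ((V (a / k) (bb / k)).getD (a % k) []).getD (bb % k) "" := hchar
          _ = ((List.range m).flatMap (fun j => (V (a / k) j).getD (a % k) [])).getD bb "" := hTentry.symm
          _ = _ := List.getD_eq_getElem _ _ hb2
    have h1R : a < (((List.range m).flatMap (fun iOut =>
          (List.range m).flatMap (fun jOut =>
            (List.range k).flatMap (fun i =>
              (List.range k).map (fun j =>
                (iOut * k + i, jOut * k + j, ((V iOut jOut).getD i []).getD j "")))))).foldl pvWrite
          ((List.range (m * k)).map (fun _ => (List.range (m * k)).map (fun _ => ("." : String))))).length := by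
      rw [pv_foldl_write_length, hFMlen]; exact h1
    calc _ = (((List.range m).flatMap (fun iOut =>
              (List.range m).flatMap (fun jOut =>
                (List.range k).flatMap (fun i =>
                  (List.range k).map (fun j =>
                    (iOut * k + i, jOut * k + j, ((V iOut jOut).getD i []).getD j "")))))).foldl pvWrite
              ((List.range (m * k)).map (fun _ => (List.range (m * k)).map (fun _ => ("." : String))))).getD a [] :=
            (List.getD_eq_getElem _ _ h1R).symm
      _ = (List.range m).flatMap (fun j => (V (a / k) j).getD (a % k) []) := hrows
      _ = ((List.range m).flatMap (fun q => (List.range k).map (fun i =>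
            (List.range m).flatMap (fun j => (V q j).getD i [])))).getD a [] := hTrow.symm
      _ = _ := List.getD_eq_getElem _ _ h2

-- ---- split / base-case helpers ----

theorem pv_split_grid (matrix : List (List String)) (b m : Nat)
    (hrows : ∀ row ∈ matrix, row.length = matrix.length)
    (hb : b = if matrix.length % 2 = 0 then 2 else 3)
    (hm : m = matrix.length / b) :
    splitMatrix matrix =
      (List.range m).map (fun io => (List.range m).map (fun jo => pvBlock matrix b io jo)) := by
  have hb0 : 0 < b := by rcases (by by_cases hpar : matrix.length % 2 = 0 <;> simp [hpar, hb] :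
    b = 2 ∨ b = 3) with h | h <;> omega
  have hmb : m * b ≤ matrix.length := by rw [hm]; exact Nat.div_mul_le_self _ _
  simp only [splitMatrix]
  have hinner : (if matrix.length % 2 == 0 then 2 else 3) = b := by
    by_cases hpar : matrix.length % 2 = 0 <;> simp [hpar, hb]
  have houter : (if matrix.length % 2 == 0 then matrix.length / 2 else matrix.length / 3) = m := by
    by_cases hpar : matrix.length % 2 = 0 <;> simp [hpar, hb, hm]
  rw [hinner, houter]
  apply List.map_congr_left
  intro io hio
  apply List.map_congr_left
  intro jo hjo
  simp only [List.mem_range] at hio hjo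
  unfold pvBlock
  apply List.map_congr_left
  intro i hi
  simp only [List.mem_range] at hi
  have hidx : io * b + i < matrix.length := by
    have h1 : (io + 1) * b ≤ m * b := Nat.mul_le_mul_right b (by omega)
    have h2 : (io + 1) * b = io * b + b := by ring
    omega
  have hrowlen : (matrix.getD (io * b + i) []).length = matrix.length := by
    rw [List.getD_eq_getElem _ _ hidx]
    exact hrows _ (List.getElem_mem _)
  exact pv_map_range_getD_eq_drop_take _ (jo * b) b "" (by
    have h1 : (jo + 1) * b ≤ m * b := Nat.mul_le_mul_right b (by omega)
    have h2 : (jo + 1) * b = jo * b + b := by ring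
    rw [hrowlen]; omega)

theorem pv_block_head_small (matrix : List (List String)) (b io jo : Nat)
    (hb : b = 2 ∨ b = 3) :
    ((pvBlock matrix b io jo).headD []).length ≤ 3 ∧ pvBlock matrix b io jo ≠ [] := by
  have hhead : (pvBlock matrix b io jo).headD [] =
      ((matrix.getD (io * b + 0) []).drop (jo * b)).take b := by
    rcases hb with rfl | rfl <;> rfl
  constructor
  · rw [hhead]
    have := List.length_take_le b ((matrix.getD (io * b + 0) []).drop (jo * b))
    rcases hb with rfl | rfl <;> omega
  · rcases hb with rfl | rfl <;> simp [pvBlock]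

theorem pv_enh_small (matrix : List (List String))
    (dict : List (String × List (List String))) (hne : matrix ≠ [])
    (hsmall : (matrix.headD []).length ≤ 3) :
    enhanceMatrix matrix dict = PySem.Dict.getD (PySem.Dict.mk dict) (pvKey matrix) [] := by
  rw [enhanceMatrix, if_neg (by omega), pv_parse_eq_key matrix hne]

-- ---- main theorem ----

theorem pv_main : ∀ (matrix : List (List String)) (dict : List (String × List (List String))),
    Pre_enhanceMatrix matrix dict → enhanceMatrix matrix dict = enhanceMatrix_alt matrix dict := by
  intro matrix dict hpre
  obtain ⟨hne, hrest⟩ := hpre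
  by_cases hle : (matrix.headD []).length ≤ 3
  · rw [if_pos hle] at hrest
    rw [pv_enh_small matrix dict hne hle]
    simp only [enhanceMatrix_alt]
    rw [if_pos hle]
    rfl
  · rw [if_neg hle] at hrest
    obtain ⟨hsq, hrows, hblocks⟩ := hrest
    set b : Nat := if matrix.length % 2 = 0 then 2 else 3 with hbdef
    set m : Nat := matrix.length / b with hmdef
    set k : Nat := ((PySem.Dict.get? (PySem.Dict.mk dict)
      (pvKey (pvBlock matrix b 0 0))).getD []).length with hkdef
    have hb23 : b = 2 ∨ b = 3 := by
      by_cases hpar : matrix.length % 2 = 0 <;> simp [hpar, hbdef]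
    have hsgt : 3 < matrix.length := by rw [hsq]; omega
    have hb0 : 0 < b := by rcases hb23 with h | h <;> omega
    have hm0 : 0 < m := by
      rw [hmdef]
      have : b ≤ matrix.length := by rcases hb23 with h | h <;> omega
      exact Nat.le_div_iff_mul_le hb0 |>.mpr (by omega)
    have hV : ∀ io < m, ∀ jo < m,
        (PySem.Dict.getD (PySem.Dict.mk dict) (pvKey (pvBlock matrix b io jo)) []).length = k ∧
        ∀ row ∈ PySem.Dict.getD (PySem.Dict.mk dict) (pvKey (pvBlock matrix b io jo)) [],
          row.length = k := by
      intro io hio jo hjo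
      have h := hblocks io (List.mem_range.mpr hio) jo (List.mem_range.mpr hjo)
      rw [PySem.Dict.getD_eq_get?_getD]
      cases hget : PySem.Dict.get? (PySem.Dict.mk dict) (pvKey (pvBlock matrix b io jo)) with
      | none => rw [hget] at h; simp [Option.any] at h
      | some v =>
        rw [hget] at h
        simp only [Option.any, Bool.and_eq_true, beq_iff_eq, List.all_eq_true] at h
        refine ⟨h.1, fun row hrow => ?_⟩
        have := h.2 row hrow
        simpa using this
    -- ---- A side ----
    rw [enhanceMatrix, if_pos (by omega)]
    rw [pv_split_grid matrix b m hrows hbdef hmdef]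
    have hgrid : ((List.range m).map (fun io => (List.range m).map
          (fun jo => pvBlock matrix b io jo))).attach.map
        (fun row => row.1.attach.map (fun c => enhanceMatrix c.1 dict))
        = (List.range m).map (fun io => (List.range m).map (fun jo =>
            PySem.Dict.getD (PySem.Dict.mk dict) (pvKey (pvBlock matrix b io jo)) [])) := by
      apply List.ext_getElem
      · simp
      · intro i h1 h2
        simp only [List.getElem_map, List.getElem_attach]
        apply List.ext_getElem
        · simp
        · intro j hj1 hj2
          simp only [List.getElem_map, List.getElem_attach, List.getElem_range]
          obtain ⟨hsmall, hne2⟩ := pv_block_head_small matrix b _ _ hb23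
          exact pv_enh_small _ dict hne2 hsmall
    rw [hgrid, pv_compose_grid m k hm0
      (fun io jo => PySem.Dict.getD (PySem.Dict.mk dict) (pvKey (pvBlock matrix b io jo)) [])
      (fun io hio jo hjo => (hV io hio jo hjo).1)
      (fun io hio jo hjo => (hV io hio jo hjo).2)]
    -- ---- B side ----
    simp only [enhanceMatrix_alt]
    rw [if_neg hle]
    have hBb : (if (matrix.headD []).length % 2 == 0 then 2 else 3) = b := by
      rw [← hsq]
      by_cases hpar : matrix.length % 2 = 0 <;> simp [hpar, hbdef]
    have hBm : (matrix.headD []).length / b = m := by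
      rw [← hsq, hmdef]
    rw [hBb, hBm]
    have hkey : ∀ bi < m, ∀ bj < m,
        PySem.Str.join "/" ((List.range b).map (fun r =>
          PySem.Str.join "" (PySem.List.slice (matrix.getD (bi * b + r) [])
            (some ((bj * b : Nat) : Int)) (some ((bj * b + b : Nat) : Int)))))
        = pvKey (pvBlock matrix b bi bj) := by
      intro bi _ bj _
      unfold pvKey pvBlock
      rw [List.map_map]
      congr 1
      apply List.map_congr_left
      intro r _
      rw [PySem.List.slice_natCast]
      rw [show bj * b + b - bj * b = b by omega]
      rfl
    have hcons : List.range m = 0 :: (List.range (m - 1)).map Nat.succ := by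
      cases hm : m with
      | zero => omega
      | succ mm => rw [List.range_succ_eq_map]; simp
    have hbody : ∀ out : List (List String), ∀ bi ∈ List.range m,
        (fun (out : List (List String)) (bi : Nat) =>
          match (List.range m).foldl
            (fun (rowsOpt : Option (List (List String))) bj =>
              some ((PySem.List.enumerate (match rowsOpt with
                | none => (PySem.Dict.getD (PySem.Dict.mk dict)
                    (PySem.Str.join "/" ((List.range b).map (fun r =>
                      PySem.Str.join "" (PySem.List.slice (matrix.getD (bi * b + r) [])
                        (some ((bj * b : Nat) : Int)) (some ((bj * b + b : Nat) : Int)))))) []).map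
                    (fun _ => ([] : List String))
                | some rs => rs) 0).map (fun p => p.2 ++ PySem.List.pyGetD
                  (PySem.Dict.getD (PySem.Dict.mk dict)
                    (PySem.Str.join "/" ((List.range b).map (fun r =>
                      PySem.Str.join "" (PySem.List.slice (matrix.getD (bi * b + r) [])
                        (some ((bj * b : Nat) : Int)) (some ((bj * b + b : Nat) : Int)))))) []) p.1 [])))
            none with
          | some rs => out ++ rs
          | none => out) out bi
        = out ++ (List.range k).map (fun r => (List.range m).flatMap (fun bj =>
            (PySem.Dict.getD (PySem.Dict.mk dict) (pvKey (pvBlock matrix b bi bj)) []).getD r [])) := by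
      intro out bi hbi
      beta_reduce
      simp only [List.mem_range] at hbi
      have hbodyfun : (fun (rowsOpt : Option (List (List String))) (bj : Nat) =>
          some ((PySem.List.enumerate (match rowsOpt with
            | none => (PySem.Dict.getD (PySem.Dict.mk dict)
                (PySem.Str.join "/" ((List.range b).map (fun r =>
                  PySem.Str.join "" (PySem.List.slice (matrix.getD (bi * b + r) [])
                    (some ((bj * b : Nat) : Int)) (some ((bj * b + b : Nat) : Int)))))) []).map
                (fun _ => ([] : List String))
            | some rs => rs) 0).map (fun p => p.2 ++ PySem.List.pyGetD
              (PySem.Dict.getD (PySem.Dict.mk dict)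
                (PySem.Str.join "/" ((List.range b).map (fun r =>
                  PySem.Str.join "" (PySem.List.slice (matrix.getD (bi * b + r) [])
                    (some ((bj * b : Nat) : Int)) (some ((bj * b + b : Nat) : Int)))))) []) p.1 [])))
          = (fun (rowsOpt : Option (List (List String))) (bj : Nat) =>
          some ((PySem.List.enumerate (match rowsOpt with
            | none => ((fun bj => PySem.Dict.getD (PySem.Dict.mk dict)
                (pvKey (pvBlock matrix b bi bj)) []) bj).map (fun _ => ([] : List String))
            | some rs => rs) 0).map (fun p => p.2 ++ PySem.List.pyGetD
              ((fun bj => PySem.Dict.getD (PySem.Dict.mk dict)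
                (pvKey (pvBlock matrix b bi bj)) []) bj) p.1 []))) := by
        funext rowsOpt bj
        by_cases hbj : bj < m
        · rw [hkey bi hbi bj hbj]
        · -- key equality holds for every bj in fact; reprove without bound
          have : PySem.Str.join "/" ((List.range b).map (fun r =>
              PySem.Str.join "" (PySem.List.slice (matrix.getD (bi * b + r) [])
                (some ((bj * b : Nat) : Int)) (some ((bj * b + b : Nat) : Int)))))
              = pvKey (pvBlock matrix b bi bj) := by
            unfold pvKey pvBlock
            rw [List.map_map]
            congr 1
            apply List.map_congr_left
            intro r _
            rw [PySem.List.slice_natCast]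
            rw [show bj * b + b - bj * b = b by omega]
            rfl
          rw [this]
      rw [hbodyfun]
      rw [hcons]
      rw [pv_B_inner_none k (fun bj => PySem.Dict.getD (PySem.Dict.mk dict)
        (pvKey (pvBlock matrix b bi bj)) []) ((List.range (m - 1)).map Nat.succ) 0
        ((hV bi hbi 0 hm0).1)]
    have hbodyEq := PySem.List.foldl_congr_mem (List.range m) _ _ ([] : List (List String)) hbody
    rw [hbodyEq, PySem.List.foldl_append_eq_flatMap, List.nil_append]

-- ===== VERDICT (by name: the statement is the Claim_ definition above) =====
theorem enhanceMatrix_spec : Claim_equal_enhanceMatrix := by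
  intro matrix dict _ hpre
  exact pv_main matrix dict hpre
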